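-- pv_equiv track=rewrite | github.com/jwoods02/uni-card-trick-game | card_trick.py | deal_cards_into_3_columns
-- ===== SOURCE A (Python) =====
-- def deal_cards_into_3_columns(card_pile):
--     """Deals cards row by row into 3 columns of 7 cards.
--
--     Parameters
--     ----------
--     card_pile: A list containing 21 cards.
--
--     Returns
--     ----------
--     [column_1, column_2, column_3]: A 2d list containing the 3 columns of
--                                     7 cards.
--     """
--     column_1, column_2, column_3 = [], [], []
--     column_count = 1
--
--     for card in card_pile:
--         if column_count == 1:
--             column_1.append(card)
--             column_count += 1
--
--         elif column_count == 2:
--             column_2.append(card)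
--             column_count += 1
--
--         else:
--             column_3.append(card)
--             column_count = 1
--
--     return [column_1, column_2, column_3]
-- ===== SOURCE B (Python) =====
-- def deal_cards_into_3_columns(card_pile):
--     """Deals cards into 3 columns by strided slicing (card i -> column i % 3)."""
--     column_1 = card_pile[0::3]
--     column_2 = card_pile[1::3]
--     column_3 = card_pile[2::3]
--     return [column_1, column_2, column_3]
-- ===== Notes on version B (the rewrite author's own statement) =====
-- stated objective: simpler
-- what changed: Replaces the round-robin loop with a mod-3 counter and three mutable accumulators by three independent strided slices card_pile[i::3], i = 0,1,2.
import Mathlib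
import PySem

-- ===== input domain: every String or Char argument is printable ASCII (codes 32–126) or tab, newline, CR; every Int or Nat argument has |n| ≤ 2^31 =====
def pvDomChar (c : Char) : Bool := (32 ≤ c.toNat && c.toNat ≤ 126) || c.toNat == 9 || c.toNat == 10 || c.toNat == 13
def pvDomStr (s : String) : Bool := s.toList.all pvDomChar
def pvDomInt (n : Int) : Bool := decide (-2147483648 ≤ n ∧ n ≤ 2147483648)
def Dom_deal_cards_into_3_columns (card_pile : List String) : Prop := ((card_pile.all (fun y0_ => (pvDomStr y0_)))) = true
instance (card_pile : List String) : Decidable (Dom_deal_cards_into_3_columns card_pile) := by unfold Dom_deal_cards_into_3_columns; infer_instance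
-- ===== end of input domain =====

-- B replaces A's round-robin loop with a counter by three independent strided slices card_pile[i::3]: a simpler decomposition, same O(n) cost.


-- ===== PORT A =====
-- one step of A's loop body: append the card to the column selected by the counter, advance the counter
def pvStepA (st : List String × List String × List String × Int) (card : String) :
    List String × List String × List String × Int :=
  match st with
  | (c1, c2, c3, k) =>
    if k = 1 then (c1 ++ [card], c2, c3, k + 1)
    else if k = 2 then (c1, c2 ++ [card], c3, k + 1)
    else (c1, c2, c3 ++ [card], 1)

def deal_cards_into_3_columns (card_pile : List String) : List (List String) :=
  match card_pile.foldl pvStepA ([], [], [], 1) with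
  | (c1, c2, c3, _) => [c1, c2, c3]

-- ===== PORT B =====
-- card_pile[i::3]; the step is the nonzero literal 3, so slice? always returns `some`; .getD [] extracts the value
def deal_cards_into_3_columns_alt (card_pile : List String) : List (List String) :=
  let column_1 := (PySem.List.slice? card_pile (some 0) none 3).getD []
  let column_2 := (PySem.List.slice? card_pile (some 1) none 3).getD []
  let column_3 := (PySem.List.slice? card_pile (some 2) none 3).getD []
  [column_1, column_2, column_3]

-- ===== PRECONDITION & SPEC =====
def Spec_deal_cards_into_3_columns (card_pile : List String) (out : List (List String)) : Prop := out = deal_cards_into_3_columns_alt card_pile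
instance (card_pile : List String) (out : List (List String)) : Decidable (Spec_deal_cards_into_3_columns card_pile out) := by unfold Spec_deal_cards_into_3_columns; infer_instance

-- ===== CLAIM (what is proved, stated in full; the proofs are below) =====
def Claim_equal_deal_cards_into_3_columns : Prop := ∀ (card_pile : List String), Dom_deal_cards_into_3_columns card_pile → Spec_deal_cards_into_3_columns card_pile (deal_cards_into_3_columns card_pile)

-- ===== LEMMAS AND PROOFS =====

-- every third element of xs, starting at index i
def strideFrom (xs : List String) (i : Nat) : List String :=
  if h : i < xs.length then xs[i] :: strideFrom xs (i + 3) else []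
termination_by xs.length - i
decreasing_by omega

lemma strideFrom_nil (xs : List String) (i : Nat) (h : xs.length ≤ i) :
    strideFrom xs i = [] := by
  rw [strideFrom]; simp [Nat.not_lt.mpr h]

lemma strideFrom_shift (x : String) (xs : List String) (i : Nat) :
    strideFrom (x :: xs) (i + 1) = strideFrom xs i := by
  conv_lhs => rw [strideFrom]
  conv_rhs => rw [strideFrom]
  by_cases h : i < xs.length
  · rw [dif_pos (show i + 1 < (x :: xs).length from by simp; omega), dif_pos h]
    rw [show i + 1 + 3 = (i + 3) + 1 from rfl, strideFrom_shift x xs (i + 3)]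
    simp
  · rw [dif_neg (show ¬ (i + 1 < (x :: xs).length) from by simp; omega), dif_neg h]
termination_by xs.length - i
decreasing_by omega

lemma strideFrom_cons (x : String) (xs : List String) :
    strideFrom (x :: xs) 0 = x :: strideFrom xs 2 := by
  rw [strideFrom]
  simp only [List.length_cons, show (0:Nat) < xs.length + 1 from by omega, dif_pos]
  rw [show (0:Nat) + 3 = 2 + 1 from rfl, strideFrom_shift]
  rfl

-- filterMap of every-third indices over a long-enough range is strideFrom
lemma filterMap_range_stride (xs : List String) :
    ∀ (n i : Nat), xs.length ≤ i + 3 * n →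
      (List.range n).filterMap (fun k => xs[i + 3 * k]?) = strideFrom xs i := by
  intro n
  induction n with
  | zero =>
    intro i h
    simp [strideFrom_nil xs i (by omega)]
  | succ n ih =>
    intro i h
    rw [List.range_succ_eq_map, List.filterMap_cons, List.filterMap_map]
    by_cases hi : i < xs.length
    · simp only [Nat.mul_zero, Nat.add_zero, List.getElem?_eq_getElem hi]
      rw [strideFrom, dif_pos hi]
      congr 1
      rw [← ih (i + 3) (by omega)]
      apply List.filterMap_congr
      intro k _
      simp only [Function.comp]
      rw [show i + 3 * Nat.succ k = i + 3 + 3 * k from by omega]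
    · simp only [Nat.mul_zero, Nat.add_zero,
        List.getElem?_eq_none_iff.mpr (show xs.length ≤ i from by omega)]
      rw [strideFrom_nil xs i (by omega), ← strideFrom_nil xs (i + 3) (by omega),
        ← ih (i + 3) (by omega)]
      apply List.filterMap_congr
      intro k _
      simp only [Function.comp]
      rw [show i + 3 * Nat.succ k = i + 3 + 3 * k from by omega]

-- B's slice with step 3 from a small start is strideFrom
lemma slice_step3_eq_stride (xs : List String) (i : Nat) (hi : i ≤ 2) :
    (PySem.List.slice? xs (some (i : Int)) none 3).getD [] = strideFrom xs i := by
  rw [PySem.List.slice?]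
  simp only [PySem.List.sliceIndices]
  norm_num
  rw [if_neg (show ¬((i:Int) < 0) from by omega)]
  by_cases h : i < xs.length
  · rw [min_eq_left (show (i:Int) ≤ (xs.length:Int) from by omega),
      if_pos (show (i:Int) < (xs.length:Int) from by omega)]
    have hfun : (fun k : Nat => xs[((i : Int) + 3 * (k : Int)).toNat]?) =
        (fun k : Nat => xs[i + 3 * k]?) := by
      funext k
      rw [show ((i : Int) + 3 * (k : Int)).toNat = i + 3 * k from by omega]
    rw [hfun]
    exact filterMap_range_stride xs _ i (by omega)
  · rw [min_eq_right (show (xs.length:Int) ≤ (i:Int) from by omega),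
      if_neg (show ¬((xs.length:Int) < (xs.length:Int)) from by omega)]
    simp [strideFrom_nil xs i (by omega)]

-- A's loop, characterized for each of the three counter values
lemma foldA_char (xs : List String) :
    (∀ c1 c2 c3 : List String, ∃ k, xs.foldl pvStepA (c1, c2, c3, 1) =
      (c1 ++ strideFrom xs 0, c2 ++ strideFrom xs 1, c3 ++ strideFrom xs 2, k)) ∧
    (∀ c1 c2 c3 : List String, ∃ k, xs.foldl pvStepA (c1, c2, c3, 2) =
      (c1 ++ strideFrom xs 2, c2 ++ strideFrom xs 0, c3 ++ strideFrom xs 1, k)) ∧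
    (∀ c1 c2 c3 : List String, ∃ k, xs.foldl pvStepA (c1, c2, c3, 3) =
      (c1 ++ strideFrom xs 1, c2 ++ strideFrom xs 2, c3 ++ strideFrom xs 0, k)) := by
  induction xs with
  | nil =>
    refine ⟨fun c1 c2 c3 => ⟨1, ?_⟩, fun c1 c2 c3 => ⟨2, ?_⟩, fun c1 c2 c3 => ⟨3, ?_⟩⟩ <;>
      simp [List.foldl, strideFrom_nil]
  | cons x xs ih =>
    obtain ⟨ih1, ih2, ih3⟩ := ih
    refine ⟨fun c1 c2 c3 => ?_, fun c1 c2 c3 => ?_, fun c1 c2 c3 => ?_⟩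
    · obtain ⟨k, hk⟩ := ih2 (c1 ++ [x]) c2 c3
      refine ⟨k, ?_⟩
      rw [List.foldl_cons, show pvStepA (c1, c2, c3, 1) x = (c1 ++ [x], c2, c3, 2) from by
          simp [pvStepA], hk, strideFrom_cons,
        show (1:Nat) = 0 + 1 from rfl, strideFrom_shift,
        show (2:Nat) = 1 + 1 from rfl, strideFrom_shift]
      simp
    · obtain ⟨k, hk⟩ := ih3 c1 (c2 ++ [x]) c3
      refine ⟨k, ?_⟩
      rw [List.foldl_cons, show pvStepA (c1, c2, c3, 2) x = (c1, c2 ++ [x], c3, 3) from by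
          simp [pvStepA], hk,
        show (2:Nat) = 1 + 1 from rfl, strideFrom_shift, strideFrom_cons,
        show (1:Nat) = 0 + 1 from rfl, strideFrom_shift]
      simp
    · obtain ⟨k, hk⟩ := ih1 c1 c2 (c3 ++ [x])
      refine ⟨k, ?_⟩
      rw [List.foldl_cons, show pvStepA (c1, c2, c3, 3) x = (c1, c2, c3 ++ [x], 1) from by
          simp [pvStepA], hk,
        show (1:Nat) = 0 + 1 from rfl, strideFrom_shift,
        show (2:Nat) = 1 + 1 from rfl, strideFrom_shift, strideFrom_cons]
      simp

-- ===== VERDICT (by name: the statement is the Claim_ definition above) =====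
theorem deal_cards_into_3_columns_spec : Claim_equal_deal_cards_into_3_columns := by
  intro card_pile _
  unfold Spec_deal_cards_into_3_columns deal_cards_into_3_columns deal_cards_into_3_columns_alt
  obtain ⟨k, hk⟩ := (foldA_char card_pile).1 [] [] []
  rw [hk]
  have h0 : (PySem.List.slice? card_pile (some 0) none 3).getD [] = strideFrom card_pile 0 :=
    slice_step3_eq_stride card_pile 0 (by omega)
  have h1 : (PySem.List.slice? card_pile (some 1) none 3).getD [] = strideFrom card_pile 1 :=
    slice_step3_eq_stride card_pile 1 (by omega)
  have h2 : (PySem.List.slice? card_pile (some 2) none 3).getD [] = strideFrom card_pile 2 :=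
    slice_step3_eq_stride card_pile 2 (by omega)
  simp [h0, h1, h2]
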